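-- pv_equiv track=rewrite | github.com/DonDevil/crawler | utils/url_utils.py | classify_media_url
-- ===== SOURCE A (Python) =====
-- VIDEO_EXTENSIONS = {
--     ".mp4",
--     ".avi",
--     ".mkv",
--     ".mov",
--     ".webm",
--     ".m4v",
--     ".mpeg",
--     ".mpg",
--     ".ogv",
-- }
--
-- AUDIO_EXTENSIONS = {
--     ".mp3",
--     ".wav",
--     ".aac",
--     ".flac",
--     ".ogg",
--     ".m4a",
--     ".opus",
-- }
--
-- STREAMING_EXTENSIONS = {
--     ".m3u8",
--     ".mpd",
--     ".m3u",
--     ".ts",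
--     ".m4s",
-- }
--
-- DOCUMENT_EXTENSIONS = {
--     ".pdf",
-- }
--
-- ARCHIVE_EXTENSIONS = {
--     ".zip",
--     ".rar",
--     ".tar",
--     ".gz",
-- }
--
-- def classify_media_url(url: str, content_type: str | None = None) -> str:
--     lowered_url = (url or "").lower()
--     lowered_type = (content_type or "").lower()
--
--     if any(token in lowered_type for token in ("mpegurl", "dash+xml")) or any(lowered_url.endswith(ext) for ext in STREAMING_EXTENSIONS):
--         return "stream-manifest"
--     if lowered_type.startswith("video/") or any(lowered_url.endswith(ext) for ext in VIDEO_EXTENSIONS):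
--         return "video"
--     if lowered_type.startswith("audio/") or any(lowered_url.endswith(ext) for ext in AUDIO_EXTENSIONS):
--         return "audio"
--     if any(lowered_url.endswith(ext) for ext in DOCUMENT_EXTENSIONS):
--         return "document"
--     if any(lowered_url.endswith(ext) for ext in ARCHIVE_EXTENSIONS):
--         return "archive"
--     return "unknown"
-- ===== SOURCE B (Python) =====
-- EXT_TO_CATEGORY = {
--     ".mp4": "video", ".avi": "video", ".mkv": "video", ".mov": "video",
--     ".webm": "video", ".m4v": "video", ".mpeg": "video", ".mpg": "video", ".ogv": "video",
--     ".mp3": "audio", ".wav": "audio", ".aac": "audio", ".flac": "audio",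
--     ".ogg": "audio", ".m4a": "audio", ".opus": "audio",
--     ".m3u8": "stream-manifest", ".mpd": "stream-manifest", ".m3u": "stream-manifest",
--     ".ts": "stream-manifest", ".m4s": "stream-manifest",
--     ".pdf": "document",
--     ".zip": "archive", ".rar": "archive", ".tar": "archive", ".gz": "archive",
-- }
--
--
-- def classify_media_url(url: str, content_type: str | None = None) -> str:
--     lowered_url = (url or "").lower()
--     lowered_type = (content_type or "").lower()
--
--     idx = lowered_url.rfind(".")
--     ext = lowered_url[idx:] if idx != -1 else ""
--     ext_cat = EXT_TO_CATEGORY.get(ext)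
--
--     if "mpegurl" in lowered_type or "dash+xml" in lowered_type or ext_cat == "stream-manifest":
--         return "stream-manifest"
--     if lowered_type.startswith("video/") or ext_cat == "video":
--         return "video"
--     if lowered_type.startswith("audio/") or ext_cat == "audio":
--         return "audio"
--     if ext_cat == "document":
--         return "document"
--     if ext_cat == "archive":
--         return "archive"
--     return "unknown"
-- ===== Notes on version B (the rewrite author's own statement) =====
-- stated objective: simpler
-- what changed: B replaces A's five any(lowered_url.endswith(ext)) scans over extension sets by extracting the trailing extension once with str.rfind of the dot character and doing a single lookup in one extension-to-category dict, keeping the same priority chain on the precomputed category.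
import Mathlib
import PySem

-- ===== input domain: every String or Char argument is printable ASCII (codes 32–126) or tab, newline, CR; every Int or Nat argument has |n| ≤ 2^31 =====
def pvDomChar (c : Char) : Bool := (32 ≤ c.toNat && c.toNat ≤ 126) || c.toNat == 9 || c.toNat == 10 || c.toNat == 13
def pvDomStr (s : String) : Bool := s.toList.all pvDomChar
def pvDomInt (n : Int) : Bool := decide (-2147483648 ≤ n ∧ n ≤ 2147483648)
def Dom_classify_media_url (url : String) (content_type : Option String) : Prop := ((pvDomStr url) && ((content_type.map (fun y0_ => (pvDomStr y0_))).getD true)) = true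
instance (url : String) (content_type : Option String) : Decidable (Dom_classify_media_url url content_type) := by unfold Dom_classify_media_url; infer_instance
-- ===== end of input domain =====

-- B replaces A's five any(lowered_url.endswith(ext)) set-scans by extracting the trailing
-- extension once (rfind of the last dot) and a single extension→category table lookup (simpler).

-- ===== PORT A =====
def pvVideoExts : List String := [".mp4", ".avi", ".mkv", ".mov", ".webm", ".m4v", ".mpeg", ".mpg", ".ogv"]
def pvAudioExts : List String := [".mp3", ".wav", ".aac", ".flac", ".ogg", ".m4a", ".opus"]
def pvStreamingExts : List String := [".m3u8", ".mpd", ".m3u", ".ts", ".m4s"]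
def pvDocumentExts : List String := [".pdf"]
def pvArchiveExts : List String := [".zip", ".rar", ".tar", ".gz"]

def classify_media_url (url : String) (content_type : Option String) : String :=
  let loweredUrl := PySem.Str.lower (if url == "" then "" else url)       -- (url or "").lower()
  let loweredType := PySem.Str.lower (content_type.getD "")               -- (content_type or "").lower()
  if (["mpegurl", "dash+xml"].any (fun token => PySem.Str.isIn token loweredType))
      || pvStreamingExts.any (fun ext => PySem.Str.endswith loweredUrl ext) then "stream-manifest"
  else if PySem.Str.startswith loweredType "video/"
      || pvVideoExts.any (fun ext => PySem.Str.endswith loweredUrl ext) then "video"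
  else if PySem.Str.startswith loweredType "audio/"
      || pvAudioExts.any (fun ext => PySem.Str.endswith loweredUrl ext) then "audio"
  else if pvDocumentExts.any (fun ext => PySem.Str.endswith loweredUrl ext) then "document"
  else if pvArchiveExts.any (fun ext => PySem.Str.endswith loweredUrl ext) then "archive"
  else "unknown"

-- ===== PORT B =====
def pvExtToCategory : PySem.Dict String String := PySem.Dict.mk
  [(".mp4", "video"), (".avi", "video"), (".mkv", "video"), (".mov", "video"),
   (".webm", "video"), (".m4v", "video"), (".mpeg", "video"), (".mpg", "video"), (".ogv", "video"),
   (".mp3", "audio"), (".wav", "audio"), (".aac", "audio"), (".flac", "audio"),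
   (".ogg", "audio"), (".m4a", "audio"), (".opus", "audio"),
   (".m3u8", "stream-manifest"), (".mpd", "stream-manifest"), (".m3u", "stream-manifest"),
   (".ts", "stream-manifest"), (".m4s", "stream-manifest"),
   (".pdf", "document"),
   (".zip", "archive"), (".rar", "archive"), (".tar", "archive"), (".gz", "archive")]

def classify_media_url_alt (url : String) (content_type : Option String) : String :=
  let loweredUrl := PySem.Str.lower (if url == "" then "" else url)       -- (url or "").lower()
  let loweredType := PySem.Str.lower (content_type.getD "")               -- (content_type or "").lower()
  let idx := PySem.Str.rfind loweredUrl "."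
  let ext := if idx ≠ -1 then PySem.Str.slice loweredUrl (some idx) none else ""
  let extCat := pvExtToCategory.get? ext
  if PySem.Str.isIn "mpegurl" loweredType || PySem.Str.isIn "dash+xml" loweredType
      || (extCat == some "stream-manifest") then "stream-manifest"
  else if PySem.Str.startswith loweredType "video/" || (extCat == some "video") then "video"
  else if PySem.Str.startswith loweredType "audio/" || (extCat == some "audio") then "audio"
  else if extCat == some "document" then "document"
  else if extCat == some "archive" then "archive"
  else "unknown"

-- ===== PRECONDITION & SPEC =====
def Spec_classify_media_url (url : String) (content_type : Option String) (out : String) : Prop := out = classify_media_url_alt url content_type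
instance (url : String) (content_type : Option String) (out : String) : Decidable (Spec_classify_media_url url content_type out) := by unfold Spec_classify_media_url; infer_instance

-- ===== CLAIM (what is proved, stated in full; the proofs are below) =====
def Claim_equal_classify_media_url : Prop := ∀ (url : String) (content_type : Option String), Dom_classify_media_url url content_type → Spec_classify_media_url url content_type (classify_media_url url content_type)

-- ===== LEMMAS AND PROOFS =====

-- B's extension extraction, written exactly as port B computes it (definitionally equal to its `ext`)
def pvExtOf (lu : String) : String :=
  if PySem.Str.rfind lu "." ≠ -1 then PySem.Str.slice lu (some (PySem.Str.rfind lu ".")) none else ""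

theorem pv_head?_mem {c : Char} {l : List Char} (h : l.head? = some c) : c ∈ l := by
  cases l <;> simp_all

-- ['.'].isPrefixOf tests the head character
theorem pv_prefix_dot (l : List Char) : ['.'].isPrefixOf l = (l.head? == some '.') := by
  cases l <;> simp [List.isPrefixOf, eq_comm]

-- one-step unfoldings of rfind.go specialised to the pattern ['.']
theorem pv_go_zero (s : List Char) :
    PySem.Chars.rfind.go s ['.'] 0 = if s.head? = some '.' then (0 : Int) else -1 := by
  rw [PySem.Chars.rfind.go, pv_prefix_dot]
  by_cases h : s.head? = some '.' <;> simp [h]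

theorem pv_go_succ (s : List Char) (k : Nat) :
    PySem.Chars.rfind.go s ['.'] (k + 1) =
      if (s.drop (k + 1)).head? = some '.' then ((k + 1 : Nat) : Int)
      else PySem.Chars.rfind.go s ['.'] k := by
  rw [PySem.Chars.rfind.go, pv_prefix_dot]
  by_cases h : (s.drop (k + 1)).head? = some '.' <;> simp [h]

-- rfind.go returns i when position i holds '.' and no position in (i, k] does
theorem pv_go_eq (s : List Char) (i k : Nat) (hik : i ≤ k)
    (hi : (s.drop i).head? = some '.')
    (hhigh : ∀ j, i < j → j ≤ k → (s.drop j).head? ≠ some '.') :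
    PySem.Chars.rfind.go s ['.'] k = i := by
  induction k with
  | zero =>
      interval_cases i
      rw [pv_go_zero, if_pos (by simpa using hi)]
      simp
  | succ k ih =>
      rcases Nat.lt_or_ge i (k + 1) with hlt | hge
      · rw [pv_go_succ, if_neg (hhigh (k + 1) hlt (le_refl _))]
        exact ih (Nat.lt_succ_iff.mp hlt) (fun j h1 h2 => hhigh j h1 (Nat.le_succ_of_le h2))
      · have hieq : i = k + 1 := le_antisymm hik hge
        subst hieq
        rw [pv_go_succ, if_pos hi]

-- any result of rfind.go is -1 or a valid dot position
theorem pv_go_cases (s : List Char) (k : Nat) :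
    PySem.Chars.rfind.go s ['.'] k = -1 ∨
    ∃ i : Nat, i ≤ k ∧ PySem.Chars.rfind.go s ['.'] k = i ∧ (s.drop i).head? = some '.' := by
  induction k with
  | zero =>
      by_cases h : s.head? = some '.'
      · right; exact ⟨0, le_refl _, by rw [pv_go_zero, if_pos h]; simp, by simpa using h⟩
      · left; rw [pv_go_zero, if_neg h]
  | succ k ih =>
      by_cases h : (s.drop (k + 1)).head? = some '.'
      · right; exact ⟨k + 1, le_refl _, by rw [pv_go_succ, if_pos h], h⟩
      · rw [pv_go_succ, if_neg h]
        rcases ih with h' | ⟨i, hik, hval, hdot⟩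
        · left; exact h'
        · right; exact ⟨i, Nat.le_succ_of_le hik, hval, hdot⟩

-- rfind of '.' on t ++ '.'::body (body dot-free) is t.length
theorem pv_rfind_append (t body : List Char) (hb : '.' ∉ body) :
    PySem.Chars.rfind (t ++ '.' :: body) ['.'] = (t.length : Int) := by
  unfold PySem.Chars.rfind
  apply pv_go_eq
  · simp [List.length_append]
  · simp
  · intro j hj hjk h
    have hdj : List.drop j (t ++ '.' :: body) = List.drop (j - t.length - 1) body := by
      rw [show j = t.length + (j - t.length) from by omega, List.drop_append,
        show t.length + (j - t.length) - t.length = (j - t.length - 1) + 1 from by omega]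
      simp [List.drop_succ_cons]
    rw [hdj] at h
    exact hb (List.mem_of_mem_drop (pv_head?_mem h))

-- the key characterisation: for an extension '.'++body (body dot-free),
-- "lu ends with the extension" ↔ "B's extracted extension equals it"
theorem pv_ext_char (s body : List Char) (hb : '.' ∉ body) :
    PySem.Chars.endswith s ('.' :: body) = true ↔
      (if PySem.Chars.rfind s ['.'] ≠ -1
        then List.drop (PySem.Chars.rfind s ['.']).toNat s else []) = '.' :: body := by
  constructor
  · intro h
    obtain ⟨t, ht⟩ := (PySem.Chars.endswith_iff s ('.' :: body)).mp h
    subst ht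
    rw [pv_rfind_append t body hb]
    simp
  · intro h
    by_cases hne : PySem.Chars.rfind s ['.'] ≠ -1
    · rw [if_pos hne] at h
      rw [PySem.Chars.endswith_iff]
      rw [← h]
      exact List.drop_suffix _ _
    · rw [if_neg hne] at h
      exact absurd h.symm (by simp)

-- lift to B's String-level extraction
theorem pv_extOf_toList (lu : String) :
    (pvExtOf lu).toList =
      (if PySem.Chars.rfind lu.toList ['.'] ≠ -1
        then List.drop (PySem.Chars.rfind lu.toList ['.']).toNat lu.toList else []) := by
  unfold pvExtOf
  have hr : PySem.Str.rfind lu "." = PySem.Chars.rfind lu.toList ['.'] := by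
    simp [PySem.Str.rfind_eq]
  by_cases hne : PySem.Chars.rfind lu.toList ['.'] ≠ -1
  · rw [if_pos (by rw [hr]; exact hne), if_pos hne]
    rcases pv_go_cases lu.toList lu.toList.length with h | ⟨i, _, hval, _⟩
    · exact absurd (by unfold PySem.Chars.rfind; exact h) hne
    · have hval' : PySem.Chars.rfind lu.toList ['.'] = (i : Int) := by
        unfold PySem.Chars.rfind; exact hval
      rw [PySem.Str.toList_slice, PySem.Chars.slice_eq_listSlice, hr, hval',
        PySem.List.slice_from _ (by positivity)]
  · rw [if_neg (by rw [hr]; exact hne), if_neg hne]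
    rfl

-- endswith against a fixed extension string, as a test on B's extracted extension
theorem pv_endswith_eq (lu e : String) (body : List Char)
    (hshape : e.toList = '.' :: body) (hb : '.' ∉ body) :
    PySem.Str.endswith lu e = (pvExtOf lu == e) := by
  rw [Bool.eq_iff_iff]
  rw [PySem.Str.endswith_eq, hshape, beq_iff_eq]
  rw [pv_ext_char lu.toList body hb]
  rw [← pv_extOf_toList lu, ← hshape]
  exact ⟨fun h => String.toList_inj.mp h, fun h => by rw [h]⟩

-- the literal table, read back per category: lookup x gives category c iff x is one of c's extensions
theorem pv_any_no_key (k : String) (q : String × String → Bool) (t : List (String × String))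
    (hk : k ∉ t.map Prod.fst) : t.any (fun p => k == p.1 && q p) = false := by
  induction t with
  | nil => rfl
  | cons a t ih =>
      simp only [List.map_cons, List.mem_cons, not_or] at hk
      simp only [List.any_cons, Bool.or_eq_false_iff]
      exact ⟨by simp; intro h; exact absurd h hk.1, ih hk.2⟩

theorem pv_get?_any (x c : String) (ps : List (String × String))
    (hnd : (ps.map Prod.fst).Nodup) :
    ((PySem.Dict.mk ps).get? x == some c) = ps.any (fun p => x == p.1 && p.2 == c) := by
  induction ps with
  | nil => rfl
  | cons a t ih =>
      obtain ⟨k, v⟩ := a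
      simp only [List.map_cons, List.nodup_cons] at hnd
      rw [PySem.Dict.get?_mk_cons, List.any_cons]
      by_cases h : k = x
      · subst h
        rw [if_pos (by simp), pv_any_no_key k _ t hnd.1]
        simp
      · rw [if_neg (by simp [h]), ih hnd.2]
        have hxk : (x == k) = false := by simp [beq_iff_eq]; exact fun hx => h hx.symm
        simp [hxk]

theorem pv_tbl_stream (x : String) :
    (pvExtToCategory.get? x == some "stream-manifest") = pvStreamingExts.any (fun e => x == e) := by
  rw [pvExtToCategory, pv_get?_any x "stream-manifest" _ (by decide)]
  simp [pvStreamingExts]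

theorem pv_tbl_video (x : String) :
    (pvExtToCategory.get? x == some "video") = pvVideoExts.any (fun e => x == e) := by
  rw [pvExtToCategory, pv_get?_any x "video" _ (by decide)]
  simp [pvVideoExts]

theorem pv_tbl_audio (x : String) :
    (pvExtToCategory.get? x == some "audio") = pvAudioExts.any (fun e => x == e) := by
  rw [pvExtToCategory, pv_get?_any x "audio" _ (by decide)]
  simp [pvAudioExts]

theorem pv_tbl_document (x : String) :
    (pvExtToCategory.get? x == some "document") = pvDocumentExts.any (fun e => x == e) := by
  rw [pvExtToCategory, pv_get?_any x "document" _ (by decide)]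
  simp [pvDocumentExts]

theorem pv_tbl_archive (x : String) :
    (pvExtToCategory.get? x == some "archive") = pvArchiveExts.any (fun e => x == e) := by
  rw [pvExtToCategory, pv_get?_any x "archive" _ (by decide)]
  simp [pvArchiveExts]

-- the five bridge equalities between A's scans and B's lookup
theorem pv_any_stream (lu : String) :
    pvStreamingExts.any (fun ext => PySem.Str.endswith lu ext)
      = (pvExtToCategory.get? (pvExtOf lu) == some "stream-manifest") := by
  rw [pv_tbl_stream]
  simp only [pvStreamingExts, List.any_cons, List.any_nil]
  rw [pv_endswith_eq lu ".m3u8" ['m','3','u','8'] (by decide) (by decide),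
    pv_endswith_eq lu ".mpd" ['m','p','d'] (by decide) (by decide),
    pv_endswith_eq lu ".m3u" ['m','3','u'] (by decide) (by decide),
    pv_endswith_eq lu ".ts" ['t','s'] (by decide) (by decide),
    pv_endswith_eq lu ".m4s" ['m','4','s'] (by decide) (by decide)]

theorem pv_any_video (lu : String) :
    pvVideoExts.any (fun ext => PySem.Str.endswith lu ext)
      = (pvExtToCategory.get? (pvExtOf lu) == some "video") := by
  rw [pv_tbl_video]
  simp only [pvVideoExts, List.any_cons, List.any_nil]
  rw [pv_endswith_eq lu ".mp4" ['m','p','4'] (by decide) (by decide),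
    pv_endswith_eq lu ".avi" ['a','v','i'] (by decide) (by decide),
    pv_endswith_eq lu ".mkv" ['m','k','v'] (by decide) (by decide),
    pv_endswith_eq lu ".mov" ['m','o','v'] (by decide) (by decide),
    pv_endswith_eq lu ".webm" ['w','e','b','m'] (by decide) (by decide),
    pv_endswith_eq lu ".m4v" ['m','4','v'] (by decide) (by decide),
    pv_endswith_eq lu ".mpeg" ['m','p','e','g'] (by decide) (by decide),
    pv_endswith_eq lu ".mpg" ['m','p','g'] (by decide) (by decide),
    pv_endswith_eq lu ".ogv" ['o','g','v'] (by decide) (by decide)]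

theorem pv_any_audio (lu : String) :
    pvAudioExts.any (fun ext => PySem.Str.endswith lu ext)
      = (pvExtToCategory.get? (pvExtOf lu) == some "audio") := by
  rw [pv_tbl_audio]
  simp only [pvAudioExts, List.any_cons, List.any_nil]
  rw [pv_endswith_eq lu ".mp3" ['m','p','3'] (by decide) (by decide),
    pv_endswith_eq lu ".wav" ['w','a','v'] (by decide) (by decide),
    pv_endswith_eq lu ".aac" ['a','a','c'] (by decide) (by decide),
    pv_endswith_eq lu ".flac" ['f','l','a','c'] (by decide) (by decide),
    pv_endswith_eq lu ".ogg" ['o','g','g'] (by decide) (by decide),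
    pv_endswith_eq lu ".m4a" ['m','4','a'] (by decide) (by decide),
    pv_endswith_eq lu ".opus" ['o','p','u','s'] (by decide) (by decide)]

theorem pv_any_document (lu : String) :
    pvDocumentExts.any (fun ext => PySem.Str.endswith lu ext)
      = (pvExtToCategory.get? (pvExtOf lu) == some "document") := by
  rw [pv_tbl_document]
  simp only [pvDocumentExts, List.any_cons, List.any_nil]
  rw [pv_endswith_eq lu ".pdf" ['p','d','f'] (by decide) (by decide)]

theorem pv_any_archive (lu : String) :
    pvArchiveExts.any (fun ext => PySem.Str.endswith lu ext)
      = (pvExtToCategory.get? (pvExtOf lu) == some "archive") := by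
  rw [pv_tbl_archive]
  simp only [pvArchiveExts, List.any_cons, List.any_nil]
  rw [pv_endswith_eq lu ".zip" ['z','i','p'] (by decide) (by decide),
    pv_endswith_eq lu ".rar" ['r','a','r'] (by decide) (by decide),
    pv_endswith_eq lu ".tar" ['t','a','r'] (by decide) (by decide),
    pv_endswith_eq lu ".gz" ['g','z'] (by decide) (by decide)]

-- ===== VERDICT (by name: the statement is the Claim_ definition above) =====
theorem classify_media_url_spec : Claim_equal_classify_media_url := by
  intro url content_type _
  unfold Spec_classify_media_url
  show classify_media_url url content_type = classify_media_url_alt url content_type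
  simp only [classify_media_url, classify_media_url_alt]
  rw [pv_any_stream, pv_any_video, pv_any_audio, pv_any_document, pv_any_archive]
  simp only [pvExtOf, List.any_cons, List.any_nil, Bool.or_false, Bool.or_assoc]
  rfl
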